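-- pv_equiv track=rewrite | github.com/AbdulkadirBastug/Yazilim-Testi | project/tools.py | count_javadoc_comments
-- ===== SOURCE A (Python) =====
-- def count_javadoc_comments(lines):
--    #Javadoc yorum satırlarını sayar.
--
--     javadoc_comment_count = 0
--     in_javadoc = False
--     for line in lines:
--         line = line.strip()
--         if not in_javadoc and line.startswith("/**"):
--             in_javadoc = True
--         if in_javadoc:
--             javadoc_comment_count += 1
--             if line.endswith("*/"):
--                 in_javadoc = False
--     return javadoc_comment_count
-- ===== SOURCE B (Python) =====
-- def count_javadoc_comments(lines):
--     stripped = [l.strip() for l in lines]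
--     n = len(stripped)
--     total = 0
--     i = 0
--     while i < n:
--         if stripped[i].startswith("/**"):
--             total += 1
--             if not stripped[i].endswith("*/"):
--                 i += 1
--                 while i < n:
--                     total += 1
--                     if stripped[i].endswith("*/"):
--                         break
--                     i += 1
--         i += 1
--     return total
-- ===== Notes on version B (the rewrite author's own statement) =====
-- stated objective: alternative
-- what changed: Replaces A's single-pass boolean in_javadoc flag machine with a pre-stripped list scanned by an explicit two-level index loop: an outer while locating a '/**' opener and an inner while consuming the block up to its '*/' closer.
import Mathlib
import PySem

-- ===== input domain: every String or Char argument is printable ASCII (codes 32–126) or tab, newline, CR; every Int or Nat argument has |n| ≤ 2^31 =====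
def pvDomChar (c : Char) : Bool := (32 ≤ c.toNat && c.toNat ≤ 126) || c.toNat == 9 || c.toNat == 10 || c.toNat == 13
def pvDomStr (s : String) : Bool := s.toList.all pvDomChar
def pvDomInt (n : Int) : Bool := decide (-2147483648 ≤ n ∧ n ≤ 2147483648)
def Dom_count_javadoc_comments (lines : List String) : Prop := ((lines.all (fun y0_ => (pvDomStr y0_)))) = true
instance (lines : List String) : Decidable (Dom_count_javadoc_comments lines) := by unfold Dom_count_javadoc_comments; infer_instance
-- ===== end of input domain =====

-- B replaces A's one-pass boolean-flag state machine by a pre-stripped list scanned with an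
-- explicit two-level "locate block / consume block" traversal (objective: alternative, same cost).


-- ===== PORT A =====
-- A's loop body: state = (javadoc_comment_count, in_javadoc)
def cjStep (st : Int × Bool) (line : String) : Int × Bool :=
  let s := PySem.Str.strip line
  let inJ := if !st.2 && PySem.Str.startswith s "/**" then true else st.2
  if inJ then (st.1 + 1, if PySem.Str.endswith s "*/" then false else inJ)
  else (st.1, inJ)

def count_javadoc_comments (lines : List String) : Int :=
  (lines.foldl cjStep (0, false)).1

-- ===== PORT B =====
mutual
-- outer while-loop of Source B: scan (already stripped) lines for a "/**" opener
def cjOuter : List String → Int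
  | [] => 0
  | s :: rest =>
    if PySem.Str.startswith s "/**" then
      if PySem.Str.endswith s "*/" then 1 + cjOuter rest
      else 1 + cjInner rest
    else cjOuter rest
-- inner while-loop of Source B: count lines of the open block until a "*/" closer
def cjInner : List String → Int
  | [] => 0
  | s :: rest =>
    if PySem.Str.endswith s "*/" then 1 + cjOuter rest
    else 1 + cjInner rest
end

def count_javadoc_comments_alt (lines : List String) : Int :=
  cjOuter (lines.map PySem.Str.strip)

-- ===== PRECONDITION & SPEC =====
def Spec_count_javadoc_comments (lines : List String) (out : Int) : Prop := out = count_javadoc_comments_alt lines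
instance (lines : List String) (out : Int) : Decidable (Spec_count_javadoc_comments lines out) := by unfold Spec_count_javadoc_comments; infer_instance

-- ===== CLAIM (what is proved, stated in full; the proofs are below) =====
def Claim_equal_count_javadoc_comments : Prop := ∀ (lines : List String), Dom_count_javadoc_comments lines → Spec_count_javadoc_comments lines (count_javadoc_comments lines)

-- ===== LEMMAS AND PROOFS =====
lemma cj_key (rest : List String) : ∀ c : Int,
    (List.foldl cjStep (c, false) rest).1 = c + cjOuter (rest.map PySem.Str.strip) ∧
    (List.foldl cjStep (c, true) rest).1 = c + cjInner (rest.map PySem.Str.strip) := by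
  induction rest with
  | nil => intro c; simp [cjOuter, cjInner]
  | cons l rest ih =>
    intro c
    constructor
    · by_cases hs : PySem.Chars.startswith (PySem.Chars.strip l.toList) ['/', '*', '*'] = true
      · by_cases he : PySem.Chars.endswith (PySem.Chars.strip l.toList) ['*', '/'] = true
        · have e1 : cjStep (c, false) l = (c + 1, false) := by simp [cjStep, hs, he]
          have e2 : cjOuter (PySem.Str.strip l :: rest.map PySem.Str.strip)
              = 1 + cjOuter (rest.map PySem.Str.strip) := by simp [cjOuter, hs, he]
          rw [List.map_cons, List.foldl_cons, e1, e2, (ih (c + 1)).1]; ring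
        · have e1 : cjStep (c, false) l = (c + 1, true) := by simp [cjStep, hs, he]
          have e2 : cjOuter (PySem.Str.strip l :: rest.map PySem.Str.strip)
              = 1 + cjInner (rest.map PySem.Str.strip) := by simp [cjOuter, hs, he]
          rw [List.map_cons, List.foldl_cons, e1, e2, (ih (c + 1)).2]; ring
      · have e1 : cjStep (c, false) l = (c, false) := by simp [cjStep, hs]
        have e2 : cjOuter (PySem.Str.strip l :: rest.map PySem.Str.strip)
            = cjOuter (rest.map PySem.Str.strip) := by simp [cjOuter, hs]
        rw [List.map_cons, List.foldl_cons, e1, e2, (ih c).1]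
    · by_cases he : PySem.Chars.endswith (PySem.Chars.strip l.toList) ['*', '/'] = true
      · have e1 : cjStep (c, true) l = (c + 1, false) := by simp [cjStep, he]
        have e2 : cjInner (PySem.Str.strip l :: rest.map PySem.Str.strip)
            = 1 + cjOuter (rest.map PySem.Str.strip) := by simp [cjInner, he]
        rw [List.map_cons, List.foldl_cons, e1, e2, (ih (c + 1)).1]; ring
      · have e1 : cjStep (c, true) l = (c + 1, true) := by simp [cjStep, he]
        have e2 : cjInner (PySem.Str.strip l :: rest.map PySem.Str.strip)
            = 1 + cjInner (rest.map PySem.Str.strip) := by simp [cjInner, he]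
        rw [List.map_cons, List.foldl_cons, e1, e2, (ih (c + 1)).2]; ring

-- ===== VERDICT (by name: the statement is the Claim_ definition above) =====
theorem count_javadoc_comments_spec : Claim_equal_count_javadoc_comments := by
  intro lines _
  unfold Spec_count_javadoc_comments count_javadoc_comments count_javadoc_comments_alt
  simpa using (cj_key lines 0).1
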